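-- pv_equiv track=rewrite | github.com/piachouaifaty/GenDLN | genetic_dln/src/dln/gen_dln.py | divide_json_into_subsets
-- ===== SOURCE A (Python) =====
-- def divide_json_into_subsets(input_json, num_subsets=10):
--     """
--     Divides a JSON object into a specified number of subsets.
--
--     :param input_json: The JSON object to divide.
--     :param num_subsets: The number of subsets to divide the JSON into.
--     :return: A list of dictionaries, each containing a subset of the input JSON.
--     """
--     # Convert the JSON object into a list of key-value pairs
--     items = list(input_json.items())
--
--     # Calculate the chunk size for each subset
--     chunk_size = max(1, (len(items) // num_subsets) + 1)
--
--     # Divide the items into subsets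
--     subsets = [
--         dict(items[i:i + chunk_size])
--         for i in range(0, len(items), chunk_size)
--     ]
--
--     return subsets
-- ===== SOURCE B (Python) =====
-- def divide_json_into_subsets(input_json, num_subsets=10):
--     """Single streaming pass: accumulate a running chunk instead of slicing by index ranges."""
--     chunk_size = max(1, len(input_json) // num_subsets + 1)
--     subsets = []
--     current = {}
--     for key, value in input_json.items():
--         current[key] = value
--         if len(current) == chunk_size:
--             subsets.append(current)
--             current = {}
--     if current:
--         subsets.append(current)
--     return subsets
-- ===== Notes on version B (the rewrite author's own statement) =====
-- stated objective: alternative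
-- what changed: A computes stride indices and slices the item list by index ranges (building each chunk dict from a slice); B makes a single streaming pass, accumulating a running chunk dict and flushing it whenever it reaches chunk_size.
import Mathlib
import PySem

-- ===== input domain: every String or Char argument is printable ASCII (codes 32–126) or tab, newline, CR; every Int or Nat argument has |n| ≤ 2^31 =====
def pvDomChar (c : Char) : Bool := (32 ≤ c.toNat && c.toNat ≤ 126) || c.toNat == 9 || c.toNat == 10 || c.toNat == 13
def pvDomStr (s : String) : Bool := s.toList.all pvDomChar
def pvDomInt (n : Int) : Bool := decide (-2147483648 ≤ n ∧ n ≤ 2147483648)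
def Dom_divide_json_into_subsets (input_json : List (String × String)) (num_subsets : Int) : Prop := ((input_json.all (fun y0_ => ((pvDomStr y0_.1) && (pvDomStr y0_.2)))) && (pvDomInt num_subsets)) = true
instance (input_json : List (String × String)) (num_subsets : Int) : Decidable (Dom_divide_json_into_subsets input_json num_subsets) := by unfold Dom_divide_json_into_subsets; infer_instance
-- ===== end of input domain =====

-- B replaces A's index-range slicing by a single streaming pass with a running chunk accumulator
-- (objective: alternative decomposition, same O(n) cost).

-- ===== PORT A =====
def divide_json_into_subsets (input_json : List (String × String)) (num_subsets : Int) : List (List (String × String)) :=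
  let items := input_json
  let chunk_size : Int := max 1 (PySem.Int.floordiv (items.length : Int) num_subsets + 1)
  (PySem.List.pyRange 0 (items.length : Int) chunk_size).map
    (fun i => (PySem.Dict.ofList (PySem.List.slice items (some i) (some (i + chunk_size)))).items)

-- ===== PORT B =====
-- loop body of Source B's 'for key, value in input_json.items()'
def pvBStep (chunk_size : Int)
    (st : List (List (String × String)) × PySem.Dict String String)
    (p : String × String) : List (List (String × String)) × PySem.Dict String String :=
  let current := st.2.insert p.1 p.2
  if (current.size : Int) = chunk_size then (st.1 ++ [current.items], PySem.Dict.empty)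
  else (st.1, current)

def divide_json_into_subsets_alt (input_json : List (String × String)) (num_subsets : Int) : List (List (String × String)) :=
  let chunk_size : Int := max 1 (PySem.Int.floordiv (input_json.length : Int) num_subsets + 1)
  let st := input_json.foldl (pvBStep chunk_size) ([], PySem.Dict.empty)
  if st.2.items ≠ [] then st.1 ++ [st.2.items] else st.1

-- ===== PRECONDITION & SPEC =====
-- Pre_ excludes num_subsets = 0, on which A raises ZeroDivisionError (B raises too), and
-- association lists with duplicate keys, which do not represent a Python dict (A's argument is a dict,
-- whose items() always has distinct keys).
def Pre_divide_json_into_subsets (input_json : List (String × String)) (num_subsets : Int) : Prop :=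
  num_subsets ≠ 0 ∧ (input_json.map Prod.fst).Nodup
instance (input_json : List (String × String)) (num_subsets : Int) : Decidable (Pre_divide_json_into_subsets input_json num_subsets) := by unfold Pre_divide_json_into_subsets; infer_instance

def pvWitness_divide_json_into_subsets : (List (String × String)) × Int := ([("a", "1"), ("b", "2"), ("c", "3")], 2)

def Spec_divide_json_into_subsets (input_json : List (String × String)) (num_subsets : Int) (out : List (List (String × String))) : Prop := out = divide_json_into_subsets_alt input_json num_subsets
instance (input_json : List (String × String)) (num_subsets : Int) (out : List (List (String × String))) : Decidable (Spec_divide_json_into_subsets input_json num_subsets out) := by unfold Spec_divide_json_into_subsets; infer_instance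

-- ===== CLAIM (what is proved, stated in full; the proofs are below) =====
def Claim_equal_divide_json_into_subsets : Prop := ∀ (input_json : List (String × String)) (num_subsets : Int), Dom_divide_json_into_subsets input_json num_subsets → Pre_divide_json_into_subsets input_json num_subsets → Spec_divide_json_into_subsets input_json num_subsets (divide_json_into_subsets input_json num_subsets)

-- ===== LEMMAS AND PROOFS =====

-- the common chunk shape both programs produce: successive blocks of cn elements (cn ≥ 1)
def pvChunks (cn : Nat) : List (String × String) → List (List (String × String))
  | [] => []
  | x :: t => ((x :: t).take cn) :: pvChunks cn (t.drop (cn - 1))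
  termination_by l => l.length
  decreasing_by simp only [List.length_drop, List.length_cons]; omega

lemma pvChunks_nil (cn : Nat) : pvChunks cn [] = [] := by rw [pvChunks]

lemma pvChunks_cons (cn : Nat) (hc : 1 ≤ cn) (l : List (String × String)) (hl : l ≠ []) :
    pvChunks cn l = l.take cn :: pvChunks cn (l.drop cn) := by
  obtain ⟨c', rfl⟩ : ∃ c', cn = c' + 1 := ⟨cn - 1, by omega⟩
  cases l with
  | nil => exact absurd rfl hl
  | cons x t => rw [pvChunks]; simp

lemma pvRangeChunks (cn : Nat) (hc : 1 ≤ cn) :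
    ∀ (m : Nat) (xs : List (String × String)), m = (xs.length + cn - 1) / cn →
      (List.range m).map (fun k => (xs.drop (cn * k)).take cn) = pvChunks cn xs := by
  intro m
  induction m with
  | zero =>
    intro xs hm
    have hlen : xs.length = 0 := by
      rcases Nat.eq_zero_or_pos xs.length with h | h
      · exact h
      · exfalso
        have h1 : 1 ≤ (xs.length + cn - 1) / cn := by
          rw [Nat.one_le_div_iff (by omega)]; omega
        omega
    have : xs = [] := List.eq_nil_of_length_eq_zero hlen
    subst this; simp [pvChunks_nil]
  | succ m ih =>
    intro xs hm
    have hlen : 0 < xs.length := by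
      rcases Nat.eq_zero_or_pos xs.length with h | h
      · exfalso
        rw [h] at hm
        have : (0 + cn - 1) / cn = 0 := Nat.div_eq_of_lt (by omega)
        omega
      · exact h
    have hne : xs ≠ [] := by
      cases xs with
      | nil => simp at hlen
      | cons a b => simp
    have hm' : m = ((xs.drop cn).length + cn - 1) / cn := by
      rw [List.length_drop]
      by_cases h : xs.length ≤ cn
      · -- one chunk: m + 1 = 1
        have h1 : (xs.length + cn - 1) / cn = 1 :=
          Nat.div_eq_of_lt_le (by omega) (by omega)
        have h2 : (xs.length - cn + cn - 1) / cn = 0 := Nat.div_eq_of_lt (by omega)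
        omega
      · have heq : xs.length + cn - 1 = (xs.length - cn + cn - 1) + cn := by omega
        rw [heq, Nat.add_div_right _ (by omega)] at hm
        omega
    rw [List.range_succ_eq_map, List.map_cons, List.map_map]
    have hmap : (List.range m).map ((fun k => (xs.drop (cn * k)).take cn) ∘ Nat.succ)
        = (List.range m).map (fun k => ((xs.drop cn).drop (cn * k)).take cn) := by
      apply List.map_congr_left
      intro k _
      simp only [Function.comp, List.drop_drop, Nat.mul_succ]
      rw [Nat.add_comm (cn * k) cn]
    rw [hmap, ih (xs.drop cn) hm', pvChunks_cons cn hc xs hne]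
    simp

lemma pv_ofList_items (l : List (String × String)) (h : (l.map Prod.fst).Nodup) :
    (PySem.Dict.ofList l).items = l := by
  show (List.foldl (fun acc p => acc.insert p.1 p.2) PySem.Dict.empty l).items = l
  rw [PySem.Dict.items_foldl_insert_fresh l Prod.fst Prod.snd PySem.Dict.empty
        (fun a _ => by simp) h]
  simp [PySem.Dict.empty]

lemma pv_a_chunks (cn : Nat) (hc : 1 ≤ cn) (xs : List (String × String))
    (h : (xs.map Prod.fst).Nodup) :
    (PySem.List.pyRange 0 (xs.length : Int) (cn : Int)).map
        (fun i => (PySem.Dict.ofList (PySem.List.slice xs (some i) (some (i + (cn : Int))))).items)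
      = pvChunks cn xs := by
  rw [PySem.List.pyRange_of_pos 0 (xs.length : Int) (by exact_mod_cast hc)]
  rw [List.map_map]
  have hcount : (if (0 : Int) < (xs.length : Int)
      then (((xs.length : Int) - 0 + (cn : Int) - 1) / (cn : Int)).toNat else 0)
      = (xs.length + cn - 1) / cn := by
    rcases Nat.eq_zero_or_pos xs.length with h0 | h0
    · rw [if_neg (by omega), h0]
      have : (0 + cn - 1) / cn = 0 := Nat.div_eq_of_lt (by omega)
      omega
    · rw [if_pos (by exact_mod_cast h0)]
      have hcast : ((xs.length : Int) - 0 + (cn : Int) - 1) = ((xs.length + cn - 1 : Nat) : Int) := by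
        push_cast [Nat.cast_sub (by omega : 1 ≤ xs.length + cn)]
        ring
      rw [hcast]
      rfl
  rw [hcount]
  rw [← pvRangeChunks cn hc ((xs.length + cn - 1) / cn) xs rfl]
  apply List.map_congr_left
  intro k _
  simp only [Function.comp]
  have h1 : (0 : Int) + (cn : Int) * (k : Int) = ((cn * k : Nat) : Int) := by push_cast; ring
  rw [h1, PySem.List.slice_natCast_add]
  apply pv_ofList_items
  exact h.sublist (((xs.drop (cn * k)).take_sublist cn).map Prod.fst |>.trans
    ((xs.drop_sublist (cn * k)).map Prod.fst))

lemma pv_b_loop (cn : Nat) (hc : 1 ≤ cn) :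
    ∀ (xs ys : List (String × String)) (acc : List (List (String × String)))
      (cur : PySem.Dict String String),
      cur.items = ys → ys.length < cn → (((ys ++ xs).map Prod.fst).Nodup) →
      (if (xs.foldl (pvBStep (cn : Int)) (acc, cur)).2.items ≠ [] then
        (xs.foldl (pvBStep (cn : Int)) (acc, cur)).1 ++ [(xs.foldl (pvBStep (cn : Int)) (acc, cur)).2.items]
       else (xs.foldl (pvBStep (cn : Int)) (acc, cur)).1)
        = acc ++ pvChunks cn (ys ++ xs) := by
  intro xs
  induction xs with
  | nil =>
    intro ys acc cur hcur hlen hnd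
    simp only [List.foldl_nil, List.append_nil]
    cases ys with
    | nil => simp [hcur, pvChunks_nil]
    | cons y t =>
      rw [if_pos (by simp [hcur])]
      have htake : (y :: t).take cn = y :: t :=
        List.take_of_length_le (by simpa using Nat.le_of_lt hlen)
      have hdrop : t.drop (cn - 1) = [] :=
        List.drop_eq_nil_of_le (by simp at hlen ⊢; omega)
      rw [hcur, pvChunks]
      rw [htake, hdrop, pvChunks_nil]
  | cons p rest ih =>
    intro ys acc cur hcur hlen hnd
    have hkeys : cur.keys = ys.map Prod.fst := by
      show cur.items.map Prod.fst = ys.map Prod.fst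
      rw [hcur]
    have hfresh : cur.contains p.1 = false := by
      rw [PySem.Dict.contains_eq_decide_mem_keys, hkeys]
      simp only [decide_eq_false_iff_not]
      intro hmem
      rw [List.map_append] at hnd
      exact List.disjoint_of_nodup_append hnd hmem (by simp)
    have hitems : (cur.insert p.1 p.2).items = ys ++ [p] := by
      rw [PySem.Dict.items_insert_of_not_contains cur p.2 hfresh, hcur]
    have hsize : (cur.insert p.1 p.2).size = ys.length + 1 := by
      show (cur.insert p.1 p.2).items.length = ys.length + 1
      rw [hitems]; simp
    simp only [List.foldl_cons]
    by_cases hfull : ys.length + 1 = cn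
    · have hcond : pvBStep (cn : Int) (acc, cur) p = (acc ++ [ys ++ [p]], PySem.Dict.empty) := by
        unfold pvBStep
        rw [if_pos (by rw [hsize, hfull]), hitems]
      rw [hcond, ih [] (acc ++ [ys ++ [p]]) PySem.Dict.empty (by simp [PySem.Dict.empty])
            (by simpa using hc)
            (by rw [List.map_append] at hnd; simpa using ((List.nodup_append.mp hnd).2.1).of_cons)]
      have hne : ys ++ p :: rest ≠ [] := by simp
      rw [pvChunks_cons cn hc _ hne]
      have hsplit : ys ++ p :: rest = (ys ++ [p]) ++ rest := by simp
      have htake : (ys ++ p :: rest).take cn = ys ++ [p] := by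
        rw [hsplit]; exact List.take_left' (by simp [← hfull])
      have hdrop : (ys ++ p :: rest).drop cn = rest := by
        rw [hsplit]; exact List.drop_left' (by simp [← hfull])
      rw [htake, hdrop]
      simp
    · have hcond : pvBStep (cn : Int) (acc, cur) p = (acc, cur.insert p.1 p.2) := by
        unfold pvBStep
        rw [if_neg (by rw [hsize]; exact_mod_cast hfull)]
      rw [hcond, ih (ys ++ [p]) acc (cur.insert p.1 p.2) hitems (by simp; omega)
            (by simpa using hnd)]
      simp

-- ===== VERDICT (by name: the statement is the Claim_ definition above) =====
theorem divide_json_into_subsets_spec : Claim_equal_divide_json_into_subsets := by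
  intro input_json num_subsets _ hpre
  obtain ⟨hnz, hnd⟩ := hpre
  unfold Spec_divide_json_into_subsets
  show (PySem.List.pyRange 0 (input_json.length : Int)
          (max 1 (PySem.Int.floordiv (input_json.length : Int) num_subsets + 1))).map
        (fun i => (PySem.Dict.ofList (PySem.List.slice input_json (some i)
          (some (i + max 1 (PySem.Int.floordiv (input_json.length : Int) num_subsets + 1))))).items)
      = divide_json_into_subsets_alt input_json num_subsets
  unfold divide_json_into_subsets_alt
  set c : Int := max 1 (PySem.Int.floordiv (input_json.length : Int) num_subsets + 1) with hcdef
  have hc1 : 1 ≤ c := le_max_left _ _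
  have hcast : c = ((c.toNat : Nat) : Int) := (Int.toNat_of_nonneg (by omega)).symm
  have hcn1 : 1 ≤ c.toNat := by omega
  rw [hcast]
  rw [pv_a_chunks c.toNat hcn1 input_json hnd]
  rw [pv_b_loop c.toNat hcn1 input_json [] [] PySem.Dict.empty (by simp [PySem.Dict.empty])
        (by simpa using hc1) (by simpa using hnd)]
  simp
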